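-- pv_equiv track=rewrite | github.com/dawidpawliczek4/UWr | aisd/pracownie/1/chodnik-backtracking.py | znajdz_chodnik_backtrack
-- ===== SOURCE A (Python) =====
-- def znajdz_chodnik_backtrack(kostki, lacznik, chodnik):
--     if chodnik and lacznik == 0:
--         return chodnik
--
--     for i, k in enumerate(kostki):
--         if k[0] == lacznik:
--             nowy_ch = chodnik + [k]
--             nowy_l = k[2]
--             pozostale = kostki[:i] + kostki[i+1:]
--             wynik = znajdz_chodnik_backtrack(pozostale, nowy_l, nowy_ch)
--             if wynik is not None:
--                 return wynik
--
--     return None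
-- ===== SOURCE B (Python) =====
-- def znajdz_chodnik_backtrack(kostki, lacznik, chodnik):
--     stack = [(kostki, lacznik, chodnik)]
--     while stack:
--         ks, l, ch = stack.pop()
--         if ch and l == 0:
--             return ch
--         children = []
--         for i, k in enumerate(ks):
--             if k[0] == l:
--                 children.append((ks[:i] + ks[i+1:], k[2], ch + [k]))
--         stack.extend(reversed(children))
--     return None
-- ===== Notes on version B (the rewrite author's own statement) =====
-- stated objective: alternative
-- what changed: The recursive backtracking is replaced by an iterative DFS over an explicit LIFO stack of (kostki, lacznik, chodnik) states, pushing the children of the popped state in reverse index order so the same first path is found.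
import Mathlib
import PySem

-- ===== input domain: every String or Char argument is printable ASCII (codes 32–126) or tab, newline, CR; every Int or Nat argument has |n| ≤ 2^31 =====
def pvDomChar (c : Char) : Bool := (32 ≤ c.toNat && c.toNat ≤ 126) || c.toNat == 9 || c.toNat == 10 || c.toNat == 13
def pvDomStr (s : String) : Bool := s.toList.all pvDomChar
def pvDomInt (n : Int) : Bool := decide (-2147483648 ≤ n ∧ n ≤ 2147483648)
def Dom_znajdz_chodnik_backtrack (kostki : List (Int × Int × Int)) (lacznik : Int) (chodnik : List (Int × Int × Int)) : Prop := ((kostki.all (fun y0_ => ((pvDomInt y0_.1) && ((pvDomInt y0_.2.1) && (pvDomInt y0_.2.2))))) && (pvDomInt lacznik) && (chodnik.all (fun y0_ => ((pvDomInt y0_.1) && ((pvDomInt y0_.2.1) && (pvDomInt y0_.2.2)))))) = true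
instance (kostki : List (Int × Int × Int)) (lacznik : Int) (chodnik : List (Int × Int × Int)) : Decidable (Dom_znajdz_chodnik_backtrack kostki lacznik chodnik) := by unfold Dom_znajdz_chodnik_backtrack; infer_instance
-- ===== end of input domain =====

-- B rewrites A's recursive backtracking as an explicit LIFO-stack DFS visiting the
-- same states in the same order (objective: alternative decomposition, same cost).

-- ===== PORT A =====
-- The 'for i, k in enumerate(kostki)' loop with slices 'kostki[:i] + kostki[i+1:]'
-- is ported as structural recursion over the suffix, carrying the prefix:
-- pre = kostki[:i], suf = kostki[i:], so kostki[:i] + kostki[i+1:] = pre ++ post.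
mutual
def znajdz_chodnik_backtrack (kostki : List (Int × Int × Int)) (lacznik : Int) (chodnik : List (Int × Int × Int)) : Option (List (Int × Int × Int)) :=
  if chodnik ≠ [] ∧ lacznik = 0 then some chodnik
  else zcbGo lacznik chodnik [] kostki
termination_by (kostki.length, 1, kostki.length)
decreasing_by
  simp only [List.length_nil, Nat.zero_add]
  exact Prod.Lex.right _ (Prod.Lex.left _ _ (by omega))

def zcbGo (lacznik : Int) (chodnik pre suf : List (Int × Int × Int)) : Option (List (Int × Int × Int)) :=
  match suf with
  | [] => none
  | k :: post =>
    if k.1 = lacznik then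
      match znajdz_chodnik_backtrack (pre ++ post) k.2.2 (chodnik ++ [k]) with
      | some wynik => some wynik
      | none => zcbGo lacznik chodnik (pre ++ [k]) post
    else zcbGo lacznik chodnik (pre ++ [k]) post
termination_by (pre.length + suf.length, 0, suf.length)
decreasing_by
  · exact Prod.Lex.left _ _ (by simp only [List.length_append, List.length_cons]; omega)
  · simp only [List.length_append, List.length_cons, List.length_nil]
    have h : pre.length + 1 + post.length = pre.length + (post.length + 1) := by omega
    rw [h]
    exact Prod.Lex.right _ (Prod.Lex.right _ (by omega))
  · simp only [List.length_append, List.length_cons, List.length_nil]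
    have h : pre.length + 1 + post.length = pre.length + (post.length + 1) := by omega
    rw [h]
    exact Prod.Lex.right _ (Prod.Lex.right _ (by omega))
end

-- ===== PORT B =====
-- Lean list head = top of the Python stack (Python appends reversed(children) and
-- pops from the end, so children are explored lowest index first = list head first).

-- children list built by Source B's inner for-loop over enumerate(ks)
def zcbChildren (ks : List (Int × Int × Int)) (l : Int) (ch : List (Int × Int × Int)) :
    List (List (Int × Int × Int) × Int × List (Int × Int × Int)) :=
  (PySem.List.enumerate ks).filterMap (fun ik =>
    if ik.2.1 = l then
      some (PySem.List.slice ks none (some ik.1) ++ PySem.List.slice ks (some (ik.1 + 1)) none,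
            ik.2.2.2, ch ++ [ik.2])
    else none)

-- stack-weight measure used only for termination of the loop
def zcbWeight (stack : List (List (Int × Int × Int) × Int × List (Int × Int × Int))) : Nat :=
  (stack.map (fun s => Nat.factorial (s.1.length + 1))).sum

-- proof-only recursive description of zcbChildren, needed to bound the measure
def zcbSeg (l : Int) (ch pre suf : List (Int × Int × Int)) :
    List (List (Int × Int × Int) × Int × List (Int × Int × Int)) :=
  match suf with
  | [] => []
  | k :: post =>
    (if k.1 = l then [(pre ++ post, k.2.2, ch ++ [k])] else []) ++ zcbSeg l ch (pre ++ [k]) post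

lemma zcbChildren_gen (l : Int) (ch : List (Int × Int × Int)) :
    ∀ (suf pre ks : List (Int × Int × Int)), pre ++ suf = ks →
    (PySem.List.enumerate suf (pre.length : Int)).filterMap (fun ik =>
      if ik.2.1 = l then
        some (PySem.List.slice ks none (some ik.1) ++ PySem.List.slice ks (some (ik.1 + 1)) none,
              ik.2.2.2, ch ++ [ik.2])
      else none) = zcbSeg l ch pre suf := by
  intro suf
  induction suf with
  | nil => intro pre ks _; simp [zcbSeg, PySem.List.enumerate_nil]
  | cons k post ih =>
    intro pre ks hks
    rw [PySem.List.enumerate_cons]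
    have h1 : PySem.List.slice ks none (some (pre.length : Int)) = pre := by
      rw [PySem.List.slice_to_natCast, ← hks]
      simp
    have h2 : PySem.List.slice ks (some ((pre.length : Int) + 1)) none = post := by
      have : ((pre.length : Int) + 1) = ((pre.length + 1 : Nat) : Int) := by push_cast; ring
      rw [this, PySem.List.slice_from_natCast, ← hks]
      simp [List.drop_append]
    have h3 : ((pre.length : Int) + 1) = (((pre ++ [k]).length : Nat) : Int) := by
      simp
    simp only [List.filterMap_cons]
    rcases Decidable.em (k.1 = l) with h | h
    · simp only [h, zcbSeg, h1, h2]
      rw [h3, ih (pre ++ [k]) ks (by simp [← hks])]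
      simp
    · simp only [zcbSeg, if_neg h]
      rw [h3, ih (pre ++ [k]) ks (by simp [← hks])]
      simp
lemma zcbChildren_eq_seg (ks : List (Int × Int × Int)) (l : Int) (ch : List (Int × Int × Int)) :
    zcbChildren ks l ch = zcbSeg l ch [] ks := by
  have := zcbChildren_gen l ch ks [] ks (by simp)
  simpa [zcbChildren, PySem.List.enumerate] using this

lemma zcbWeight_append (a b : List (List (Int × Int × Int) × Int × List (Int × Int × Int))) :
    zcbWeight (a ++ b) = zcbWeight a + zcbWeight b := by
  simp [zcbWeight]

lemma zcbSeg_weight (l : Int) (ch : List (Int × Int × Int)) :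
    ∀ (suf pre : List (Int × Int × Int)),
      zcbWeight (zcbSeg l ch pre suf) ≤ suf.length * Nat.factorial (pre.length + suf.length) := by
  intro suf
  induction suf with
  | nil => intro pre; simp [zcbSeg, zcbWeight]
  | cons k post ih =>
    intro pre
    have hrec := ih (pre ++ [k])
    rw [zcbSeg, zcbWeight_append]
    have hterm : zcbWeight (if k.1 = l then [(pre ++ post, k.2.2, ch ++ [k])] else [])
        ≤ Nat.factorial (pre.length + (k :: post).length) := by
      split_ifs
      · calc zcbWeight [(pre ++ post, k.2.2, ch ++ [k])]
              = Nat.factorial ((pre ++ post).length + 1) := by simp [zcbWeight]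
          _ ≤ Nat.factorial (pre.length + (k :: post).length) :=
              Nat.factorial_le (by simp only [List.length_append, List.length_cons]; omega)
      · simp [zcbWeight]
    have hlen : (pre ++ [k]).length + post.length = pre.length + (k :: post).length := by
      simp; omega
    rw [hlen] at hrec
    calc zcbWeight (if k.1 = l then [(pre ++ post, k.2.2, ch ++ [k])] else [])
          + zcbWeight (zcbSeg l ch (pre ++ [k]) post)
        ≤ Nat.factorial (pre.length + (k :: post).length)
          + post.length * Nat.factorial (pre.length + (k :: post).length) := Nat.add_le_add hterm hrec
      _ = (post.length + 1) * Nat.factorial (pre.length + (k :: post).length) := by ring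
      _ = (k :: post).length * Nat.factorial (pre.length + (k :: post).length) := by simp [Nat.add_comm]

lemma zcbChildren_weight_lt (ks : List (Int × Int × Int)) (l : Int) (ch : List (Int × Int × Int)) :
    zcbWeight (zcbChildren ks l ch) < Nat.factorial (ks.length + 1) := by
  rw [zcbChildren_eq_seg]
  have h := zcbSeg_weight l ch ks []
  simp only [List.length_nil, Nat.zero_add] at h
  calc zcbWeight (zcbSeg l ch [] ks) ≤ ks.length * Nat.factorial ks.length := h
    _ < (ks.length + 1) * Nat.factorial ks.length :=
        Nat.mul_lt_mul_of_lt_of_le (Nat.lt_succ_self _) le_rfl (Nat.factorial_pos _)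
    _ = Nat.factorial (ks.length + 1) := (Nat.factorial_succ _).symm

def zcbLoop : List (List (Int × Int × Int) × Int × List (Int × Int × Int)) → Option (List (Int × Int × Int))
  | [] => none
  | (ks, l, ch) :: rest =>
    if ch ≠ [] ∧ l = 0 then some ch
    else zcbLoop (zcbChildren ks l ch ++ rest)
termination_by stack => zcbWeight stack
decreasing_by
  have h := zcbChildren_weight_lt ks l ch
  have h2 : zcbWeight ((ks, l, ch) :: rest) = Nat.factorial (ks.length + 1) + zcbWeight rest := by
    simp [zcbWeight]
  rw [zcbWeight_append, h2]
  omega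

def znajdz_chodnik_backtrack_alt (kostki : List (Int × Int × Int)) (lacznik : Int) (chodnik : List (Int × Int × Int)) : Option (List (Int × Int × Int)) :=
  zcbLoop [(kostki, lacznik, chodnik)]

-- ===== PRECONDITION & SPEC =====
def Spec_znajdz_chodnik_backtrack (kostki : List (Int × Int × Int)) (lacznik : Int) (chodnik : List (Int × Int × Int)) (out : Option (List (Int × Int × Int))) : Prop := out = znajdz_chodnik_backtrack_alt kostki lacznik chodnik
instance (kostki : List (Int × Int × Int)) (lacznik : Int) (chodnik : List (Int × Int × Int)) (out : Option (List (Int × Int × Int))) : Decidable (Spec_znajdz_chodnik_backtrack kostki lacznik chodnik out) := by unfold Spec_znajdz_chodnik_backtrack; infer_instance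

-- ===== CLAIM (what is proved, stated in full; the proofs are below) =====
def Claim_equal_znajdz_chodnik_backtrack : Prop := ∀ (kostki : List (Int × Int × Int)) (lacznik : Int) (chodnik : List (Int × Int × Int)), Dom_znajdz_chodnik_backtrack kostki lacznik chodnik → Spec_znajdz_chodnik_backtrack kostki lacznik chodnik (znajdz_chodnik_backtrack kostki lacznik chodnik)

-- ===== LEMMAS AND PROOFS =====

-- Popping one state from the stack behaves like running A on it and falling back to the rest.
lemma zcbLoop_spec : ∀ (N : Nat) (ks : List (Int × Int × Int)) (l : Int) (ch rest : _),
    zcbWeight ((ks, l, ch) :: rest) ≤ N →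
    zcbLoop ((ks, l, ch) :: rest)
      = match znajdz_chodnik_backtrack ks l ch with
        | some w => some w
        | none => zcbLoop rest := by
  intro N
  induction N with
  | zero =>
    intro ks l ch rest h
    exfalso
    have : 0 < zcbWeight ((ks, l, ch) :: rest) := by
      simp [zcbWeight]
      exact Or.inl (Nat.factorial_pos _)
    omega
  | succ N ih =>
    intro ks l ch rest h
    rw [zcbLoop.eq_def, znajdz_chodnik_backtrack.eq_def]
    by_cases hb : ch ≠ [] ∧ l = 0
    · simp [hb]
    · simp only [if_neg hb]
      rw [zcbChildren_eq_seg]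
      -- inner induction over the suffix of kostki still to be scanned
      have key : ∀ (suf pre : List (Int × Int × Int)), pre ++ suf = ks →
          zcbLoop (zcbSeg l ch pre suf ++ rest)
            = match zcbGo l ch pre suf with
              | some w => some w
              | none => zcbLoop rest := by
        intro suf
        induction suf with
        | nil => intro pre _; simp [zcbSeg, zcbGo]
        | cons k post ihs =>
          intro pre hpre
          have hlen : pre.length + post.length + 1 = ks.length := by
            have h' := congrArg List.length hpre
            simp only [List.length_append, List.length_cons] at h'
            omega
          rcases Decidable.em (k.1 = l) with hk | hk
          · -- matching tile: the child state is on top of the stack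
            have hchild : zcbWeight ((pre ++ post, k.2.2, ch ++ [k]) :: (zcbSeg l ch (pre ++ [k]) post ++ rest)) ≤ N := by
              have h1 : zcbWeight (zcbSeg l ch (pre ++ [k]) post)
                  ≤ post.length * Nat.factorial (pre.length + post.length + 1) := by
                have := zcbSeg_weight l ch post (pre ++ [k])
                simpa [Nat.add_comm, Nat.add_left_comm, Nat.add_assoc] using this
              have h2 : Nat.factorial ((pre ++ post).length + 1)
                  = Nat.factorial (pre.length + post.length + 1) := by simp
              have h3 : (post.length + 1 + 1) * Nat.factorial (pre.length + post.length + 1)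
                  ≤ Nat.factorial (ks.length + 1) := by
                rw [← hlen, Nat.factorial_succ (pre.length + post.length + 1)]
                exact Nat.mul_le_mul_right _ (by omega)
              have h4 : zcbWeight ((ks, l, ch) :: rest)
                  = Nat.factorial (ks.length + 1) + zcbWeight rest := by
                simp [zcbWeight]
              rw [show ((pre ++ post, k.2.2, ch ++ [k]) :: (zcbSeg l ch (pre ++ [k]) post ++ rest))
                    = ([(pre ++ post, k.2.2, ch ++ [k])] ++ zcbSeg l ch (pre ++ [k]) post) ++ rest by simp,
                  zcbWeight_append, zcbWeight_append]
              have h5 : zcbWeight [(pre ++ post, k.2.2, ch ++ [k])]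
                  = Nat.factorial (pre.length + post.length + 1) := by
                simp [zcbWeight]
              have hfpos := Nat.factorial_pos (pre.length + post.length + 1)
              rw [h4] at h
              nlinarith [h1, h3, h5]
            rw [zcbSeg, zcbGo]
            simp only [if_pos hk, List.cons_append, List.nil_append]
            rw [ih (pre ++ post) k.2.2 (ch ++ [k]) (zcbSeg l ch (pre ++ [k]) post ++ rest) hchild]
            cases hA : znajdz_chodnik_backtrack (pre ++ post) k.2.2 (ch ++ [k]) with
            | some w => simp
            | none => simpa using ihs (pre ++ [k]) (by simp [← hpre])
          · rw [zcbSeg, zcbGo]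
            simp only [if_neg hk]
            simpa using ihs (pre ++ [k]) (by simp [← hpre])
      exact key ks [] (by simp)

theorem zcb_eq (ks : List (Int × Int × Int)) (l : Int) (ch : List (Int × Int × Int)) :
    znajdz_chodnik_backtrack ks l ch = znajdz_chodnik_backtrack_alt ks l ch := by
  unfold znajdz_chodnik_backtrack_alt
  rw [zcbLoop_spec (zcbWeight [(ks, l, ch)]) ks l ch [] le_rfl]
  cases znajdz_chodnik_backtrack ks l ch with
  | none => simp [zcbLoop]
  | some w => simp

-- ===== VERDICT (by name: the statement is the Claim_ definition above) =====
theorem znajdz_chodnik_backtrack_spec : Claim_equal_znajdz_chodnik_backtrack := by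
  intro kostki lacznik chodnik _
  exact zcb_eq kostki lacznik chodnik
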